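-- pv_equiv track=rewrite | github.com/pomelyu/OmniSight | .agents/skills/package-sorter/scripts/sort_packages.py | sort_gemfile
-- ===== SOURCE A (Python) =====
-- def sort_gemfile(content: str) -> str:
--     """Sort Gemfile dependencies."""
--     lines = content.splitlines(keepends=True)
--     result = []
--     gem_block = []
--     in_group = False
--
--     for line in lines:
--         stripped = line.strip()
--
--         if stripped.startswith('gem '):
--             gem_block.append(line)
--         else:
--             # Flush gem block if any
--             if gem_block:
--                 result.extend(sorted(gem_block, key=lambda x: x.lower()))
--                 gem_block = []
--             result.append(line)
--
--             # Track group blocks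
--             if 'group ' in stripped:
--                 in_group = True
--             elif stripped == 'end' and in_group:
--                 in_group = False
--
--     # Flush remaining gems
--     if gem_block:
--         result.extend(sorted(gem_block, key=lambda x: x.lower()))
--
--     return ''.join(result)
-- ===== SOURCE B (Python) =====
-- def sort_gemfile(content: str) -> str:
--     """Sort Gemfile dependencies: sort each maximal run of consecutive 'gem ' lines."""
--     lines = content.splitlines(keepends=True)
--
--     def is_gem(line):
--         return line.strip().startswith('gem ')
--
--     out = []
--     i, n = 0, len(lines)
--     while i < n:
--         if is_gem(lines[i]):
--             j = i + 1
--             while j < n and is_gem(lines[j]):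
--                 j += 1
--             out += sorted(lines[i:j], key=str.lower)
--             i = j
--         else:
--             out.append(lines[i])
--             i += 1
--     return ''.join(out)
-- ===== Notes on version B (the rewrite author's own statement) =====
-- stated objective: simpler
-- what changed: Replaces A's incremental buffer-and-flush accumulator (with its dead in_group tracking) by a two-pointer run-partition scan: find each maximal run of consecutive 'gem ' lines, sort that run, and copy other lines through.
import Mathlib
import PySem

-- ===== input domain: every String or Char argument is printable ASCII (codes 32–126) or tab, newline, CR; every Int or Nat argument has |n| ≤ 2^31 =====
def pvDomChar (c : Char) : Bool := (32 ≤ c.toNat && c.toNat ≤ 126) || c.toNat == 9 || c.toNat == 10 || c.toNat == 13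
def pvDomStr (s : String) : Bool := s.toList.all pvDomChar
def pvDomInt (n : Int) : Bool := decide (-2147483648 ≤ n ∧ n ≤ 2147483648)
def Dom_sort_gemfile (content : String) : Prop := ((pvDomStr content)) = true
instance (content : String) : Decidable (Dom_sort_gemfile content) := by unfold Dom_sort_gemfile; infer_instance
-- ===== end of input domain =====

-- B replaces A's buffer-and-flush accumulator (with its dead in_group flag) by a run-partition
-- scan: each maximal run of consecutive 'gem ' lines is sorted in place (objective: simpler).

-- splitlines(keepends=True): hand-ported, exact on the Dom alphabet, where the only line
-- boundaries are '\n', '\r' and '\r\n' (shared by both ports, like a library primitive).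
def splitKeep : List Char → List (List Char)
  | [] => []
  | '\r' :: '\n' :: rest => ['\r', '\n'] :: splitKeep rest
  | c :: rest =>
    if c = '\n' || c = '\r' then [c] :: splitKeep rest
    else
      match splitKeep rest with
      | [] => [[c]]
      | l :: ls => (c :: l) :: ls

-- key=lambda x: x.lower()
def gemKey (l : List Char) : List Char := PySem.Chars.lower l

-- ===== PORT A =====
-- one step of A's for-loop over the state (result, gem_block, in_group)
def stepA (st : List (List Char) × List (List Char) × Bool) (line : List Char) :
    List (List Char) × List (List Char) × Bool :=
  let stripped := PySem.Chars.strip line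
  if PySem.Chars.startswith stripped "gem ".toList then
    (st.1, st.2.1 ++ [line], st.2.2)
  else
    let rg := if st.2.1 = [] then (st.1, st.2.1)
              else (st.1 ++ PySem.List.sorted st.2.1 gemKey, ([] : List (List Char)))
    let b1 := if PySem.Chars.isIn "group ".toList stripped then true
              else if stripped = "end".toList ∧ st.2.2 = true then false
              else st.2.2
    (rg.1 ++ [line], rg.2, b1)

def sort_gemfile (content : String) : String :=
  let lines := splitKeep content.toList
  let st := lines.foldl stepA ([], [], false)
  let res := if st.2.1 = [] then st.1 else st.1 ++ PySem.List.sorted st.2.1 gemKey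
  String.ofList (PySem.Chars.join [] res)

-- ===== PORT B =====
def isGemB (line : List Char) : Bool :=
  PySem.Chars.startswith (PySem.Chars.strip line) "gem ".toList

-- B's while loop: emit each maximal run of gem lines sorted, other lines unchanged
def altGo : List (List Char) → List (List Char)
  | [] => []
  | l :: ls =>
    if isGemB l then
      PySem.List.sorted (l :: ls.takeWhile isGemB) gemKey ++ altGo (ls.dropWhile isGemB)
    else
      l :: altGo ls
termination_by ls => ls.length
decreasing_by
  · have := List.length_dropWhile_le (p := isGemB) (l := ls); simp; omega
  · simp

def sort_gemfile_alt (content : String) : String :=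
  String.ofList (PySem.Chars.join [] (altGo (splitKeep content.toList)))

-- ===== PRECONDITION & SPEC =====
def Spec_sort_gemfile (content : String) (out : String) : Prop := out = sort_gemfile_alt content
instance (content : String) (out : String) : Decidable (Spec_sort_gemfile content out) := by unfold Spec_sort_gemfile; infer_instance

-- ===== CLAIM (what is proved, stated in full; the proofs are below) =====
def Claim_equal_sort_gemfile : Prop := ∀ (content : String), Dom_sort_gemfile content → Spec_sort_gemfile content (sort_gemfile content)

-- ===== LEMMAS AND PROOFS =====

def condB (l : List Char) (b : Bool) : Bool :=
  if PySem.Chars.isIn "group ".toList (PySem.Chars.strip l) then true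
  else if PySem.Chars.strip l = "end".toList ∧ b = true then false
  else b

theorem stepA_gem {line : List Char} (h : isGemB line = true)
    (r g : List (List Char)) (b : Bool) :
    stepA (r, g, b) line = (r, g ++ [line], b) := by
  unfold isGemB at h
  simp only [stepA, h, if_true]

theorem stepA_nongem {line : List Char} (h : isGemB line = false)
    (r g : List (List Char)) (b : Bool) :
    stepA (r, g, b) line = (r ++ PySem.List.sorted g gemKey ++ [line], [], condB line b) := by
  unfold isGemB at h
  simp only [stepA, condB, h]
  cases g with
  | nil => simp [PySem.List.sorted]
  | cons x xs => simp

-- A's result list only grows: the accumulated result is a prefix independent of the rest of the state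
theorem stepA_fst (r g : List (List Char)) (b : Bool) (line : List Char) :
    stepA (r, g, b) line = (r ++ (stepA ([], g, b) line).1, (stepA ([], g, b) line).2) := by
  by_cases hl : isGemB line = true
  · rw [stepA_gem hl, stepA_gem hl]; simp
  · have h' : isGemB line = false := by simpa using hl
    rw [stepA_nongem h', stepA_nongem h']; simp

theorem foldl_stepA_fst (lines : List (List Char)) :
    ∀ (r g : List (List Char)) (b : Bool),
      lines.foldl stepA (r, g, b) =
        (r ++ (lines.foldl stepA ([], g, b)).1, (lines.foldl stepA ([], g, b)).2) := by
  induction lines with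
  | nil => intro r g b; simp
  | cons l ls ih =>
    intro r g b
    rcases h : stepA ([], g, b) l with ⟨a1, g1, b1⟩
    simp only [List.foldl_cons, stepA_fst r g b l, h]
    rw [ih (r ++ a1) g1 b1, ih a1 g1 b1]
    simp

-- A's fold, finalized, with pending gem block g
def finA (g : List (List Char)) (b : Bool) (lines : List (List Char)) : List (List Char) :=
  let st := lines.foldl stepA ([], g, b)
  st.1 ++ PySem.List.sorted st.2.1 gemKey

theorem altGo_runs (ls : List (List Char)) :
    altGo ls = PySem.List.sorted (ls.takeWhile isGemB) gemKey ++ altGo (ls.dropWhile isGemB) := by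
  cases ls with
  | nil => simp [altGo, PySem.List.sorted]
  | cons l t =>
    by_cases h : isGemB l = true
    · rw [altGo]; simp [h]
    · rw [List.takeWhile_cons_of_neg (by simp [h]), List.dropWhile_cons_of_neg (by simp [h])]
      simp [PySem.List.sorted]

theorem finA_eq (lines : List (List Char)) :
    ∀ (g : List (List Char)) (b : Bool),
      finA g b lines =
        PySem.List.sorted (g ++ lines.takeWhile isGemB) gemKey ++ altGo (lines.dropWhile isGemB) := by
  induction lines with
  | nil => intro g b; simp [finA, altGo]
  | cons l ls ih =>
    intro g b
    by_cases h : isGemB l = true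
    · rw [List.takeWhile_cons_of_pos h, List.dropWhile_cons_of_pos h]
      simp only [finA, List.foldl_cons, stepA_gem h]
      have hih := ih (g ++ [l]) b
      simp only [finA] at hih
      rw [hih, List.append_assoc]
      simp
    · have h' : isGemB l = false := by simpa using h
      rw [List.takeWhile_cons_of_neg (by simp [h']), List.dropWhile_cons_of_neg (by simp [h'])]
      simp only [finA, List.foldl_cons, stepA_nongem h', List.nil_append]
      rw [foldl_stepA_fst]
      have hih := ih [] (condB l b)
      simp only [finA] at hih
      simp only [List.nil_append] at hih
      have hgo : altGo (l :: ls) = l :: altGo ls := by rw [altGo]; simp [h']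
      rw [hgo, altGo_runs ls, ← hih]
      simp [List.append_assoc]

-- ===== VERDICT (by name: the statement is the Claim_ definition above) =====
theorem sort_gemfile_spec : Claim_equal_sort_gemfile := by
  intro content _
  unfold Spec_sort_gemfile sort_gemfile sort_gemfile_alt
  have h := finA_eq (splitKeep content.toList) [] false
  simp only [finA, List.nil_append] at h
  have hflush : ∀ (r g : List (List Char)),
      (if g = [] then r else r ++ PySem.List.sorted g gemKey) = r ++ PySem.List.sorted g gemKey := by
    intro r g; split_ifs with hg
    · subst hg; simp [PySem.List.sorted]
    · rfl
  simp only [hflush]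
  rw [h, ← altGo_runs]
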